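-- pv_equiv track=rewrite | github.com/HMacEntee/LBMP-Using-Gurobi | code/util.py | reachable_without_edge
-- ===== SOURCE A (Python) =====
-- from collections import deque
--
-- def reachable_without_edge(zoneA, zoneB, adj):
--     # Performs BFS from "start" zone
--     seen = {zoneA}
--     q = deque([zoneA])
--     while q:
--         u = q.popleft()
--         for v in adj[u]:
--             # Partitions along the zoneA-zoneB connection
--             if (u == zoneA and v == zoneB) or (u == zoneB and v == zoneA):
--                 continue
--             if v not in seen:
--                 seen.add(v)
--                 q.append(v)
--     return seen
-- ===== SOURCE B (Python) =====
-- def reachable_without_edge(zoneA, zoneB, adj):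
--     # Round-based saturation instead of a FIFO queue: each round rebuilds the
--     # next set as one comprehension over the whole current set, union the
--     # current set; stop at the first round that changes nothing.
--     seen = {zoneA}
--     while True:
--         nxt = {v for u in seen for v in adj[u]
--                if not ((u == zoneA and v == zoneB) or (u == zoneB and v == zoneA))} | seen
--         if nxt == seen:
--             return seen
--         seen = nxt
-- ===== Notes on version B (the rewrite author's own statement) =====
-- stated objective: alternative
-- what changed: Replaces the FIFO-queue BFS (pop a node, scan its neighbours, enqueue fresh ones) with round-based fixpoint saturation: each round rebuilds the whole next set as a single comprehension over the current set and stops when a round changes nothing; no queue or per-node frontier is maintained.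
import Mathlib
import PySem

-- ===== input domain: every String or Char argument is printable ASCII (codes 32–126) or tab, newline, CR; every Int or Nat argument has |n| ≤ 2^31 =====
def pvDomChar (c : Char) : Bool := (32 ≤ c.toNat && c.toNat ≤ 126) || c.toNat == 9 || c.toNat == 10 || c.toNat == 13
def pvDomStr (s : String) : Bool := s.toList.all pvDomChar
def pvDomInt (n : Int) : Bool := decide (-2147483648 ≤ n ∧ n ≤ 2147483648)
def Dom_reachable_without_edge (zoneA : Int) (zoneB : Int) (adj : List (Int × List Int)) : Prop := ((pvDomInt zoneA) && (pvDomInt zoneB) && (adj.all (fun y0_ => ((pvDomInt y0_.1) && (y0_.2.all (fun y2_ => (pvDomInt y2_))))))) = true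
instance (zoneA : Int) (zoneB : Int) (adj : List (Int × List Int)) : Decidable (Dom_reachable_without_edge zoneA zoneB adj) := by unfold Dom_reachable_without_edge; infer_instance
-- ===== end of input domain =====

-- B replaces A's FIFO-queue BFS by round-based fixpoint saturation (one set comprehension per round,
-- no queue); both return the reachable set, whose Python iteration order is not modelled, so both ports return it sorted.


-- A-side helpers: the severed-edge test and the neighbour lookup adj[u]
-- (adj[u] raises KeyError in Python when u is not a key; Pre_ guarantees every
--  node A looks up is a key, so the total getD is exact there)
def pvFilt (zoneA zoneB u v : Int) : Bool :=
  (u == zoneA && v == zoneB) || (u == zoneB && v == zoneA)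

def pvNbrs (adj : List (Int × List Int)) (u : Int) : List Int :=
  (PySem.Dict.mk adj).getD u []

-- all values that ever get added to `seen` (used only for A's termination measure)
def pvU (adj : List (Int × List Int)) : List Int := adj.flatMap (fun p => p.2)

def pvCnt (adj : List (Int × List Int)) (s : List Int) : Nat :=
  ((s.filter (fun x => decide (x ∈ pvU adj))).toFinset).card

-- ===== PORT A =====
-- the body of A's `for v in adj[u]` loop, threading (seen, q)
def pvBfsInner (zoneA zoneB u : Int) (st : List Int × List Int) (nb : List Int) :
    List Int × List Int :=
  nb.foldl (fun st v =>
    if pvFilt zoneA zoneB u v then st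
    else if v ∈ st.1 then st
    else (PySem.Set.add st.1 v, st.2 ++ [v])) st

lemma pvNbrs_subset (adj : List (Int × List Int)) (u : Int) :
    ∀ x ∈ pvNbrs adj u, x ∈ pvU adj := by
  induction adj with
  | nil => intro x hx; simp [pvNbrs, PySem.Dict.getD, PySem.Dict.get?] at hx
  | cons p t ih =>
    intro x hx
    rw [pvNbrs, PySem.Dict.getD_eq_get?_getD, PySem.Dict.get?_mk_cons] at hx
    by_cases h : p.1 == u
    · simp [h] at hx
      simp [pvU, List.flatMap_cons]
      exact Or.inl hx
    · simp [h] at hx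
      have := ih x (by rw [pvNbrs, PySem.Dict.getD_eq_get?_getD]; exact hx)
      simp [pvU, List.flatMap_cons]
      right
      simpa [pvU] using this

lemma pvCnt_append (adj : List (Int × List Int)) (seen add : List Int)
    (hU : ∀ x ∈ add, x ∈ pvU adj) (hn : add.Nodup) (hd : ∀ x ∈ add, x ∉ seen) :
    pvCnt adj (seen ++ add) = pvCnt adj seen + add.length := by
  unfold pvCnt
  have hadd : List.filter (fun x => decide (x ∈ pvU adj)) add = add :=
    List.filter_eq_self.mpr (fun x hx => by simpa using hU x hx)
  rw [List.filter_append, hadd, List.toFinset_append,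
      Finset.card_union_of_disjoint, List.toFinset_card_of_nodup hn]
  rw [Finset.disjoint_left]
  intro a ha hb
  have ha' : a ∈ seen := by
    simp only [List.mem_toFinset, List.mem_filter] at ha
    exact ha.1
  exact hd a (by simpa using hb) ha'

lemma pvCnt_le (adj : List (Int × List Int)) (s : List Int) :
    pvCnt adj s ≤ (pvU adj).toFinset.card := by
  apply Finset.card_le_card
  intro x hx
  simp only [List.mem_toFinset, List.mem_filter, decide_eq_true_eq] at hx ⊢
  exact hx.2

-- one full pass of the inner loop: it appends some fresh, unsevered neighbours,
-- the same list to seen and to the queue, and afterwards every unsevered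
-- neighbour of u is present (cited by pvBfsLoop's decreasing_by)
lemma pvBfsInner_ext (zoneA zoneB u : Int) (nb : List Int) :
    ∀ seen q : List Int, ∃ add : List Int,
      pvBfsInner zoneA zoneB u (seen, q) nb = (seen ++ add, q ++ add) ∧
      add.Nodup ∧
      (∀ x ∈ add, x ∈ nb ∧ pvFilt zoneA zoneB u x = false ∧ x ∉ seen) ∧
      (∀ v ∈ nb, pvFilt zoneA zoneB u v = false → v ∈ seen ++ add) := by
  induction nb with
  | nil =>
    intro seen q
    exact ⟨[], by simp [pvBfsInner], List.nodup_nil, by simp, by simp⟩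
  | cons v nb ih =>
    intro seen q
    by_cases hf : pvFilt zoneA zoneB u v = true
    · obtain ⟨add, h1, h2, h3, h4⟩ := ih seen q
      refine ⟨add, ?_, h2,
        (fun x hx => ⟨List.mem_cons_of_mem _ (h3 x hx).1, (h3 x hx).2⟩), ?_⟩
      · simpa [pvBfsInner, hf] using h1
      · intro w hw hwf
        rcases List.mem_cons.mp hw with rfl | hw
        · simp [hwf] at hf
        · exact h4 w hw hwf
    · replace hf : pvFilt zoneA zoneB u v = false := by simpa using hf
      by_cases hv : v ∈ seen
      · obtain ⟨add, h1, h2, h3, h4⟩ := ih seen q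
        refine ⟨add, ?_, h2,
          (fun x hx => ⟨List.mem_cons_of_mem _ (h3 x hx).1, (h3 x hx).2⟩), ?_⟩
        · simpa [pvBfsInner, hf, hv] using h1
        · intro w hw hwf
          rcases List.mem_cons.mp hw with rfl | hw
          · exact List.mem_append.mpr (Or.inl hv)
          · exact h4 w hw hwf
      · obtain ⟨add, h1, h2, h3, h4⟩ := ih (seen ++ [v]) (q ++ [v])
        refine ⟨v :: add, ?_, ?_, ?_, ?_⟩
        · have : pvBfsInner zoneA zoneB u (seen, q) (v :: nb)
              = pvBfsInner zoneA zoneB u (seen ++ [v], q ++ [v]) nb := by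
            simp [pvBfsInner, hf, hv]
          rw [this, h1]
          simp
        · refine List.nodup_cons.mpr ⟨?_, h2⟩
          intro hva
          have := (h3 v hva).2.2
          simp at this
        · intro x hx
          rcases List.mem_cons.mp hx with rfl | hx
          · exact ⟨List.mem_cons_self, hf, hv⟩
          · obtain ⟨ha, hb, hc⟩ := h3 x hx
            exact ⟨List.mem_cons_of_mem _ ha, hb, fun hxs => hc (by simp [hxs])⟩
        · intro w hw hwf
          rcases List.mem_cons.mp hw with rfl | hw
          · simp
          · have := h4 w hw hwf
            simpa using this

-- the BFS while-loop of A: pop u, scan adj[u], enqueue fresh nodes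
def pvBfsLoop (zoneA zoneB : Int) (adj : List (Int × List Int))
    (seen q : List Int) : List Int :=
  match q with
  | [] => seen
  | u :: rest =>
    pvBfsLoop zoneA zoneB adj
      (pvBfsInner zoneA zoneB u (seen, rest) (pvNbrs adj u)).1
      (pvBfsInner zoneA zoneB u (seen, rest) (pvNbrs adj u)).2
termination_by 2 * ((pvU adj).toFinset.card - pvCnt adj seen) + q.length
decreasing_by
  obtain ⟨add, h1, h2, h3, -⟩ := pvBfsInner_ext zoneA zoneB u (pvNbrs adj u) seen rest
  rw [h1]
  have hk := pvCnt_append adj seen add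
    (fun x hx => pvNbrs_subset adj u x (h3 x hx).1) h2 (fun x hx => (h3 x hx).2.2)
  have hle := pvCnt_le adj (seen ++ add)
  rw [hk] at hle
  simp only [hk, List.length_append, List.length_cons]
  omega

-- Python A returns the set `seen`; a set's iteration order is not modelled,
-- so the port returns its elements in sorted order (outputs are compared as sets)
def reachable_without_edge (zoneA : Int) (zoneB : Int) (adj : List (Int × List Int)) : List Int :=
  PySem.List.sorted (pvBfsLoop zoneA zoneB adj [zoneA] [zoneA]) (fun x => x) false

-- ===== PORT B =====
-- one round of B: the set comprehension over the whole current set, union the current set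
-- ( {v for u in seen for v in adj[u] if not severed} | seen )
def pvNext (zoneA zoneB : Int) (adj : List (Int × List Int)) (seen : List Int) : List Int :=
  PySem.Set.union
    (PySem.Set.ofList (seen.flatMap (fun u =>
      (pvNbrs adj u).filter (fun v =>
        !((u == zoneA && v == zoneB) || (u == zoneB && v == zoneA))))))
    seen

-- B's `while True` loop: rebuild the set each round, stop when nxt == seen (set equality)
def pvSatLoop (zoneA zoneB : Int) (adj : List (Int × List Int)) (seen : List Int) : List Int :=
  if h : PySem.Set.equal (pvNext zoneA zoneB adj seen) seen = true then seen
  else pvSatLoop zoneA zoneB adj (pvNext zoneA zoneB adj seen)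
termination_by ((zoneA :: pvU adj).toFinset \ seen.toFinset).card
decreasing_by
  have hsub : ∀ x ∈ seen, x ∈ pvNext zoneA zoneB adj seen := by
    intro x hx
    exact (PySem.Set.mem_union _ _ _).mpr (Or.inr hx)
  have hex : ∃ a, a ∈ pvNext zoneA zoneB adj seen ∧ a ∉ seen := by
    by_contra hno
    apply h
    rw [PySem.Set.equal_iff]
    intro x
    refine ⟨fun hx => ?_, hsub x⟩
    by_contra hxs
    exact hno ⟨x, hx, hxs⟩
  obtain ⟨a, haN, haS⟩ := hex
  have haU : a ∈ zoneA :: pvU adj := by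
    rcases (PySem.Set.mem_union _ _ _).mp haN with hm | hm
    · rw [PySem.Set.mem_ofList] at hm
      obtain ⟨u, -, hmf⟩ := List.mem_flatMap.mp hm
      exact List.mem_cons_of_mem _ (pvNbrs_subset adj u a (List.mem_filter.mp hmf).1)
    · exact absurd hm haS
  apply Finset.card_lt_card
  rw [Finset.ssubset_iff_of_subset
    (Finset.sdiff_subset_sdiff (Finset.Subset.refl _)
      (by intro x hx; simp only [List.mem_toFinset] at hx ⊢; exact hsub x hx))]
  refine ⟨a, ?_, ?_⟩
  · simp only [Finset.mem_sdiff, List.mem_toFinset]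
    exact ⟨haU, haS⟩
  · simp only [Finset.mem_sdiff, List.mem_toFinset]
    intro hcon
    exact hcon.2 haN

-- Python B returns the set `seen`; as in port A it is returned sorted
def reachable_without_edge_alt (zoneA : Int) (zoneB : Int) (adj : List (Int × List Int)) : List Int :=
  PySem.List.sorted (pvSatLoop zoneA zoneB adj [zoneA]) (fun x => x) false

-- ----- decision procedure for Pre_ (used only by its Decidable instance) -----
-- Pre_'s ∃-over-sublists statement is exponential to test naively; the instance below instead
-- computes the closure of {zoneA} under unsevered edges by a bounded monotone iteration and
-- checks that it stays within the keys, with pvPre_iff proving the two conditions equivalent.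
def pvGrowInner (zoneA zoneB u : Int) (acc nb : List Int) : List Int :=
  nb.foldl (fun acc v => if pvFilt zoneA zoneB u v then acc else PySem.Set.add acc v) acc

def pvGrow (zoneA zoneB : Int) (adj : List (Int × List Int)) (s : List Int) : List Int :=
  s.foldl (fun acc u => pvGrowInner zoneA zoneB u acc (pvNbrs adj u)) s

def pvClo (zoneA zoneB : Int) (adj : List (Int × List Int)) : List Int :=
  (pvGrow zoneA zoneB adj)^[(pvU adj).length + 1] [zoneA]

lemma pvGrowInner_ext (zoneA zoneB u : Int) (nb : List Int) :
    ∀ acc : List Int, ∃ add : List Int,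
      pvGrowInner zoneA zoneB u acc nb = acc ++ add ∧
      add.Nodup ∧
      (∀ x ∈ add, x ∈ nb ∧ pvFilt zoneA zoneB u x = false ∧ x ∉ acc) ∧
      (∀ v ∈ nb, pvFilt zoneA zoneB u v = false → v ∈ acc ++ add) := by
  induction nb with
  | nil =>
    intro acc
    exact ⟨[], by simp [pvGrowInner], List.nodup_nil, by simp, by simp⟩
  | cons v nb ih =>
    intro acc
    by_cases hf : pvFilt zoneA zoneB u v = true
    · obtain ⟨add, h1, h2, h3, h4⟩ := ih acc
      refine ⟨add, ?_, h2,
        (fun x hx => ⟨List.mem_cons_of_mem _ (h3 x hx).1, (h3 x hx).2⟩), ?_⟩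
      · simpa [pvGrowInner, hf] using h1
      · intro w hw hwf
        rcases List.mem_cons.mp hw with rfl | hw
        · simp [hwf] at hf
        · exact h4 w hw hwf
    · replace hf : pvFilt zoneA zoneB u v = false := by simpa using hf
      by_cases hv : v ∈ acc
      · obtain ⟨add, h1, h2, h3, h4⟩ := ih acc
        refine ⟨add, ?_, h2,
          (fun x hx => ⟨List.mem_cons_of_mem _ (h3 x hx).1, (h3 x hx).2⟩), ?_⟩
        · simpa [pvGrowInner, hf, PySem.Set.add_of_mem hv] using h1
        · intro w hw hwf
          rcases List.mem_cons.mp hw with rfl | hw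
          · exact List.mem_append.mpr (Or.inl hv)
          · exact h4 w hw hwf
      · obtain ⟨add, h1, h2, h3, h4⟩ := ih (acc ++ [v])
        refine ⟨v :: add, ?_, ?_, ?_, ?_⟩
        · have : pvGrowInner zoneA zoneB u acc (v :: nb)
              = pvGrowInner zoneA zoneB u (acc ++ [v]) nb := by
            simp [pvGrowInner, hf, PySem.Set.add_of_not_mem hv]
          rw [this, h1]; simp
        · refine List.nodup_cons.mpr ⟨?_, h2⟩
          intro hva
          have := (h3 v hva).2.2
          simp at this
        · intro x hx
          rcases List.mem_cons.mp hx with rfl | hx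
          · exact ⟨List.mem_cons_self, hf, hv⟩
          · obtain ⟨ha, hb, hc⟩ := h3 x hx
            exact ⟨List.mem_cons_of_mem _ ha, hb, fun hxs => hc (by simp [hxs])⟩
        · intro w hw hwf
          rcases List.mem_cons.mp hw with rfl | hw
          · simp
          · simpa using h4 w hw hwf

-- one closure round appends only fresh unsevered neighbours of iterated nodes, and
-- afterwards contains every unsevered neighbour of every iterated node
lemma pvGrow_ext (zoneA zoneB : Int) (adj : List (Int × List Int)) :
    ∀ (l acc : List Int), ∃ add : List Int,
      l.foldl (fun acc u => pvGrowInner zoneA zoneB u acc (pvNbrs adj u)) acc = acc ++ add ∧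
      add.Nodup ∧
      (∀ x ∈ add, x ∉ acc ∧ ∃ u ∈ l, x ∈ pvNbrs adj u ∧ pvFilt zoneA zoneB u x = false) ∧
      (∀ u ∈ l, ∀ v ∈ pvNbrs adj u, pvFilt zoneA zoneB u v = false → v ∈ acc ++ add) := by
  intro l
  induction l with
  | nil => intro acc; exact ⟨[], by simp, List.nodup_nil, by simp, by simp⟩
  | cons u l ih =>
    intro acc
    obtain ⟨a1, g1, g2, g3, g4⟩ := pvGrowInner_ext zoneA zoneB u (pvNbrs adj u) acc
    obtain ⟨a2, k1, k2, k3, k4⟩ := ih (acc ++ a1)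
    refine ⟨a1 ++ a2, ?_, ?_, ?_, ?_⟩
    · simp only [List.foldl_cons, g1, k1, List.append_assoc]
    · refine List.Nodup.append g2 k2 ?_
      intro x hx1 hx2
      exact (k3 x hx2).1 (List.mem_append.mpr (Or.inr hx1))
    · intro x hx
      rcases List.mem_append.mp hx with hx | hx
      · obtain ⟨ha, hb, hc⟩ := g3 x hx
        exact ⟨hc, u, List.mem_cons_self, ha, hb⟩
      · obtain ⟨hc, w, hw, hn, hfw⟩ := k3 x hx
        exact ⟨fun hxa => hc (List.mem_append.mpr (Or.inl hxa)),
               w, List.mem_cons_of_mem _ hw, hn, hfw⟩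
    · intro w hw v hv hvf
      rcases List.mem_cons.mp hw with rfl | hw
      · have := g4 v hv hvf
        rcases List.mem_append.mp this with h | h
        · simp [h]
        · simp [h]
      · have := k4 w hw v hv hvf
        simpa [List.append_assoc] using this

lemma pvGrow_shape (zoneA zoneB : Int) (adj : List (Int × List Int)) (s : List Int) :
    ∃ add : List Int,
      pvGrow zoneA zoneB adj s = s ++ add ∧ add.Nodup ∧
      (∀ x ∈ add, x ∉ s ∧ ∃ u ∈ s, x ∈ pvNbrs adj u ∧ pvFilt zoneA zoneB u x = false) ∧
      (∀ u ∈ s, ∀ v ∈ pvNbrs adj u, pvFilt zoneA zoneB u v = false → v ∈ s ++ add) :=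
  pvGrow_ext zoneA zoneB adj s s

lemma pvIter_nodup (zoneA zoneB : Int) (adj : List (Int × List Int)) :
    ∀ n : Nat, ((pvGrow zoneA zoneB adj)^[n] [zoneA]).Nodup := by
  intro n
  induction n with
  | zero => simp
  | succ n ih =>
    rw [Function.iterate_succ_apply']
    obtain ⟨add, ha, hb, hc, -⟩ := pvGrow_shape zoneA zoneB adj _
    rw [ha]
    exact List.Nodup.append ih hb (fun x hx1 hx2 => (hc x hx2).1 hx1)

lemma pvIter_mem (zoneA zoneB : Int) (adj : List (Int × List Int)) :
    ∀ n : Nat, ∀ x ∈ (pvGrow zoneA zoneB adj)^[n] [zoneA], x ∈ zoneA :: pvU adj := by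
  intro n
  induction n with
  | zero => simp
  | succ n ih =>
    rw [Function.iterate_succ_apply']
    obtain ⟨add, ha, -, hc, -⟩ := pvGrow_shape zoneA zoneB adj _
    rw [ha]
    intro x hx
    rcases List.mem_append.mp hx with hx | hx
    · exact ih x hx
    · obtain ⟨-, u, -, hn, -⟩ := hc x hx
      exact List.mem_cons_of_mem _ (pvNbrs_subset adj u x hn)

lemma pvIter_zoneA (zoneA zoneB : Int) (adj : List (Int × List Int)) :
    ∀ n : Nat, zoneA ∈ (pvGrow zoneA zoneB adj)^[n] [zoneA] := by
  intro n
  induction n with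
  | zero => simp
  | succ n ih =>
    rw [Function.iterate_succ_apply']
    obtain ⟨add, ha, -, -, -⟩ := pvGrow_shape zoneA zoneB adj _
    rw [ha]
    exact List.mem_append.mpr (Or.inl ih)

lemma pvIter_fix_persist (zoneA zoneB : Int) (adj : List (Int × List Int)) (k : Nat)
    (hf : pvGrow zoneA zoneB adj ((pvGrow zoneA zoneB adj)^[k] [zoneA])
        = (pvGrow zoneA zoneB adj)^[k] [zoneA]) :
    ∀ m : Nat, (pvGrow zoneA zoneB adj)^[k + m] [zoneA]
        = (pvGrow zoneA zoneB adj)^[k] [zoneA] := by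
  intro m
  induction m with
  | zero => rfl
  | succ m ih => rw [← Nat.add_assoc, Function.iterate_succ_apply', ih, hf]

lemma pvIter_len (zoneA zoneB : Int) (adj : List (Int × List Int)) :
    ∀ n : Nat,
      (∀ k < n, pvGrow zoneA zoneB adj ((pvGrow zoneA zoneB adj)^[k] [zoneA])
          ≠ (pvGrow zoneA zoneB adj)^[k] [zoneA]) →
      n < ((pvGrow zoneA zoneB adj)^[n] [zoneA]).length := by
  intro n
  induction n with
  | zero => intro _; simp
  | succ n ih =>
    intro h
    have h1 := ih (fun k hk => h k (Nat.lt_succ_of_lt hk))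
    have h2 := h n (Nat.lt_succ_self n)
    rw [Function.iterate_succ_apply']
    obtain ⟨add, ha, -, -, -⟩ := pvGrow_shape zoneA zoneB adj ((pvGrow zoneA zoneB adj)^[n] [zoneA])
    have hne : add ≠ [] := by
      intro hnil
      rw [hnil, List.append_nil] at ha
      exact h2 ha
    rw [ha, List.length_append]
    have := List.length_pos_iff.mpr hne
    omega

lemma pvClo_fix (zoneA zoneB : Int) (adj : List (Int × List Int)) :
    pvGrow zoneA zoneB adj (pvClo zoneA zoneB adj) = pvClo zoneA zoneB adj := by
  by_cases hall : ∀ k < (pvU adj).length + 1,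
      pvGrow zoneA zoneB adj ((pvGrow zoneA zoneB adj)^[k] [zoneA])
        ≠ (pvGrow zoneA zoneB adj)^[k] [zoneA]
  · exfalso
    have h1 := pvIter_len zoneA zoneB adj ((pvU adj).length + 1) hall
    have h2 : ((pvGrow zoneA zoneB adj)^[(pvU adj).length + 1] [zoneA]).length
        ≤ (zoneA :: pvU adj).length := by
      rw [← List.toFinset_card_of_nodup (pvIter_nodup zoneA zoneB adj _)]
      exact le_trans
        (Finset.card_le_card (fun x hx =>
          List.mem_toFinset.mpr
            (pvIter_mem zoneA zoneB adj _ x (List.mem_toFinset.mp hx))))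
        (List.toFinset_card_le _)
    simp only [List.length_cons] at h2
    omega
  · rw [not_forall] at hall
    simp only [Classical.not_imp, not_not] at hall
    obtain ⟨k, hk, hfix⟩ := hall
    have hpersist := pvIter_fix_persist zoneA zoneB adj k hfix
    have h1 : pvClo zoneA zoneB adj = (pvGrow zoneA zoneB adj)^[k] [zoneA] := by
      rw [pvClo, show (pvU adj).length + 1 = k + ((pvU adj).length + 1 - k) by omega]
      exact hpersist _
    rw [h1, hfix, ← h1]

-- the declarative condition of Pre_ is exactly "the closure of {zoneA} stays within the keys"
lemma pvPre_iff (zoneA zoneB : Int) (adj : List (Int × List Int)) :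
    (∀ x ∈ pvClo zoneA zoneB adj, x ∈ adj.map (fun p => p.1)) ↔
    (∃ S ∈ (adj.map (fun p => p.1)).sublists, zoneA ∈ S ∧
      ∀ u ∈ S, ∀ v ∈ pvNbrs adj u, pvFilt zoneA zoneB u v = false → v ∈ S) := by
  constructor
  · intro hC
    refine ⟨(adj.map (fun p => p.1)).filter (fun k => decide (k ∈ pvClo zoneA zoneB adj)),
      List.mem_sublists.mpr List.filter_sublist, ?_, ?_⟩
    · have hz0 : zoneA ∈ pvClo zoneA zoneB adj :=
        pvIter_zoneA zoneA zoneB adj ((pvU adj).length + 1)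
      exact List.mem_filter.mpr ⟨hC zoneA hz0, by simpa using hz0⟩
    · intro u hu v hv hvf
      have huC : u ∈ pvClo zoneA zoneB adj := by
        have := (List.mem_filter.mp hu).2
        simpa using this
      have hvC : v ∈ pvClo zoneA zoneB adj := by
        obtain ⟨add, ha, -, -, hd⟩ := pvGrow_shape zoneA zoneB adj (pvClo zoneA zoneB adj)
        have := hd u huC v hv hvf
        rw [← ha, pvClo_fix zoneA zoneB adj] at this
        exact this
      exact List.mem_filter.mpr ⟨hC v hvC, by simpa using hvC⟩
  · rintro ⟨S, hS, hz, hcl⟩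
    have hsub : S ⊆ adj.map (fun p => p.1) :=
      (List.mem_sublists.mp hS).subset
    have hiter : ∀ n : Nat, ∀ x ∈ (pvGrow zoneA zoneB adj)^[n] [zoneA], x ∈ S := by
      intro n
      induction n with
      | zero => intro x hx; rw [List.mem_singleton.mp hx]; exact hz
      | succ n ih =>
        rw [Function.iterate_succ_apply']
        obtain ⟨add, ha, -, hc, -⟩ := pvGrow_shape zoneA zoneB adj _
        rw [ha]
        intro x hx
        rcases List.mem_append.mp hx with hx | hx
        · exact ih x hx
        · obtain ⟨-, u, hu, hn, hf⟩ := hc x hx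
          exact hcl u (ih u hu) x hn hf
    exact fun x hx => hsub (hiter _ x hx)

-- ===== PRECONDITION & SPEC =====
-- Pre_ is A's domain plus the dict convention: A returns normally iff every node reachable from
-- zoneA along unsevered edges is a key of adj — equivalently, some subset of the keys contains
-- zoneA and is closed under unsevered edges; elsewhere A raises KeyError on the first missing
-- node.
def Pre_reachable_without_edge (zoneA : Int) (zoneB : Int) (adj : List (Int × List Int)) : Prop :=
  ∃ S ∈ (adj.map (fun p => p.1)).sublists, zoneA ∈ S ∧
    ∀ u ∈ S, ∀ v ∈ pvNbrs adj u, pvFilt zoneA zoneB u v = false → v ∈ S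
-- the instance decides the ∃-over-sublists condition through the equivalent polynomial
-- closure check pvPre_iff (a naive test of the existential is exponential in the key count)
instance (zoneA : Int) (zoneB : Int) (adj : List (Int × List Int)) : Decidable (Pre_reachable_without_edge zoneA zoneB adj) := by
  unfold Pre_reachable_without_edge
  exact decidable_of_iff _ (pvPre_iff zoneA zoneB adj)

def pvWitness_reachable_without_edge : Int × Int × (List (Int × List Int)) :=
  (0, 1, [(0, [1, 2]), (1, [0]), (2, [])])

def Spec_reachable_without_edge (zoneA : Int) (zoneB : Int) (adj : List (Int × List Int)) (out : List Int) : Prop := out = reachable_without_edge_alt zoneA zoneB adj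
instance (zoneA : Int) (zoneB : Int) (adj : List (Int × List Int)) (out : List Int) : Decidable (Spec_reachable_without_edge zoneA zoneB adj out) := by unfold Spec_reachable_without_edge; infer_instance

-- ===== CLAIM (what is proved, stated in full; the proofs are below) =====
def Claim_equal_reachable_without_edge : Prop := ∀ (zoneA : Int) (zoneB : Int) (adj : List (Int × List Int)), Dom_reachable_without_edge zoneA zoneB adj → Pre_reachable_without_edge zoneA zoneB adj → Spec_reachable_without_edge zoneA zoneB adj (reachable_without_edge zoneA zoneB adj)


-- ===== LEMMAS AND PROOFS =====

-- the severed-edge step relation and reachability from zoneA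
def pvE (zoneA zoneB : Int) (adj : List (Int × List Int)) (u v : Int) : Prop :=
  v ∈ pvNbrs adj u ∧ pvFilt zoneA zoneB u v = false

def pvReach (zoneA zoneB : Int) (adj : List (Int × List Int)) (x : Int) : Prop :=
  Relation.ReflTransGen (pvE zoneA zoneB adj) zoneA x

-- a seen-set that contains zoneA, is inside Reach and closed under pvE is exactly Reach
lemma pvClosed_eq (zoneA zoneB : Int) (adj : List (Int × List Int)) (s : List Int)
    (hz : zoneA ∈ s) (hr : ∀ x ∈ s, pvReach zoneA zoneB adj x)
    (hc : ∀ u ∈ s, ∀ v, pvE zoneA zoneB adj u v → v ∈ s) :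
    ∀ x, x ∈ s ↔ pvReach zoneA zoneB adj x := by
  intro x
  constructor
  · exact hr x
  · intro hx
    induction hx with
    | refl => exact hz
    | tail _ h2 ih => exact hc _ ih _ h2

-- BFS loop invariant: seen grows to exactly the reachable set
lemma pvBfsLoop_spec (zoneA zoneB : Int) (adj : List (Int × List Int)) (seen q : List Int) :
    zoneA ∈ seen → (∀ x ∈ q, x ∈ seen) → (∀ x ∈ seen, pvReach zoneA zoneB adj x) →
    (∀ u ∈ seen, u ∉ q → ∀ v, pvE zoneA zoneB adj u v → v ∈ seen) → seen.Nodup →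
    (pvBfsLoop zoneA zoneB adj seen q).Nodup ∧
      ∀ x, (x ∈ pvBfsLoop zoneA zoneB adj seen q ↔ pvReach zoneA zoneB adj x) := by
  induction seen, q using pvBfsLoop.induct zoneA zoneB adj with
  | case1 seen =>
    intro hz _ hr hc hn
    rw [pvBfsLoop]
    exact ⟨hn, pvClosed_eq zoneA zoneB adj seen hz hr (fun u hu => hc u hu (by simp))⟩
  | case2 seen u rest ih =>
    intro hz hq hr hc hn
    obtain ⟨add, h1, h2, h3, h4⟩ := pvBfsInner_ext zoneA zoneB u (pvNbrs adj u) seen rest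
    rw [pvBfsLoop]
    apply ih
    · rw [h1]; exact List.mem_append.mpr (Or.inl hz)
    · rw [h1]
      intro x hx
      rcases List.mem_append.mp hx with hx | hx
      · exact List.mem_append.mpr (Or.inl (hq x (List.mem_cons_of_mem _ hx)))
      · exact List.mem_append.mpr (Or.inr hx)
    · rw [h1]
      intro x hx
      rcases List.mem_append.mp hx with hx | hx
      · exact hr x hx
      · obtain ⟨ha, hb, -⟩ := h3 x hx
        exact Relation.ReflTransGen.tail (hr u (hq u List.mem_cons_self)) ⟨ha, hb⟩
    · rw [h1]
      intro w hw hwq v hev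
      by_cases hwu : w = u
      · subst hwu
        exact h4 v hev.1 hev.2
      · rcases List.mem_append.mp hw with hw | hw
        · have hwr : w ∉ rest := fun hr' =>
            hwq (List.mem_append.mpr (Or.inl hr'))
        -- w was already seen, is not u and is not queued: closed by the old invariant
          have : v ∈ seen := hc w hw (by
            intro hmem
            rcases List.mem_cons.mp hmem with h | h
            · exact hwu h
            · exact hwr h) v hev
          exact List.mem_append.mpr (Or.inl this)
        · exact absurd (List.mem_append.mpr (Or.inr hw)) hwq
    · rw [h1]
      exact List.Nodup.append hn h2 (fun x hx1 hx2 => (h3 x hx2).2.2 hx1)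

-- membership in one saturation round
lemma mem_pvNext (zoneA zoneB : Int) (adj : List (Int × List Int)) (seen : List Int)
    (x : Int) :
    x ∈ pvNext zoneA zoneB adj seen ↔
      (∃ u ∈ seen, x ∈ pvNbrs adj u ∧ pvFilt zoneA zoneB u x = false) ∨ x ∈ seen := by
  rw [pvNext, PySem.Set.mem_union, PySem.Set.mem_ofList, List.mem_flatMap]
  constructor
  · rintro (⟨u, hu, hf⟩ | hs)
    · obtain ⟨hn, hc⟩ := List.mem_filter.mp hf
      refine Or.inl ⟨u, hu, hn, ?_⟩
      simp only [pvFilt]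
      simp at hc ⊢
      tauto
    · exact Or.inr hs
  · rintro (⟨u, hu, hn, hf⟩ | hs)
    · refine Or.inl ⟨u, hu, List.mem_filter.mpr ⟨hn, ?_⟩⟩
      simp only [pvFilt] at hf
      simp at hf ⊢
      tauto
    · exact Or.inr hs

lemma pvNext_nodup (zoneA zoneB : Int) (adj : List (Int × List Int)) (seen : List Int) :
    (pvNext zoneA zoneB adj seen).Nodup :=
  PySem.Set.nodup_union _ _ (PySem.Set.nodup_ofList _)

-- saturation loop invariant: at the fixpoint the seen set is exactly the reachable set
lemma pvSatLoop_spec (zoneA zoneB : Int) (adj : List (Int × List Int)) (seen : List Int) :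
    zoneA ∈ seen → (∀ x ∈ seen, pvReach zoneA zoneB adj x) → seen.Nodup →
    (pvSatLoop zoneA zoneB adj seen).Nodup ∧
      ∀ x, (x ∈ pvSatLoop zoneA zoneB adj seen ↔ pvReach zoneA zoneB adj x) := by
  induction seen using pvSatLoop.induct zoneA zoneB adj with
  | case1 seen hfix =>
    intro hz hr hn
    rw [pvSatLoop, dif_pos hfix]
    refine ⟨hn, pvClosed_eq zoneA zoneB adj seen hz hr ?_⟩
    intro u hu v hev
    have hvN : v ∈ pvNext zoneA zoneB adj seen :=
      (mem_pvNext zoneA zoneB adj seen v).mpr (Or.inl ⟨u, hu, hev.1, hev.2⟩)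
    exact (PySem.Set.equal_iff _ _ |>.mp hfix v).mp hvN
  | case2 seen hfix ih =>
    intro hz hr hn
    rw [pvSatLoop, dif_neg hfix]
    apply ih
    · exact (mem_pvNext zoneA zoneB adj seen zoneA).mpr (Or.inr hz)
    · intro x hx
      rcases (mem_pvNext zoneA zoneB adj seen x).mp hx with ⟨u, hu, hnb, hf⟩ | hs
      · exact Relation.ReflTransGen.tail (hr u hu) ⟨hnb, hf⟩
      · exact hr x hs
    · exact pvNext_nodup zoneA zoneB adj seen

-- ===== VERDICT (by name: the statement is the Claim_ definition above) =====
theorem reachable_without_edge_spec : Claim_equal_reachable_without_edge := by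
  intro zoneA zoneB adj _ _
  unfold Spec_reachable_without_edge reachable_without_edge reachable_without_edge_alt
  obtain ⟨hn1, hm1⟩ := pvBfsLoop_spec zoneA zoneB adj [zoneA] [zoneA]
    (by simp) (by simp) (by rintro x hx; simp at hx; subst hx; exact Relation.ReflTransGen.refl)
    (by intro u hu huq; simp at hu; simp [hu] at huq) (by simp)
  obtain ⟨hn2, hm2⟩ := pvSatLoop_spec zoneA zoneB adj [zoneA]
    (by simp) (by rintro x hx; simp at hx; subst hx; exact Relation.ReflTransGen.refl) (by simp)
  exact PySem.List.sorted_eq_sorted_of_perm _ _ _ (fun a b h => h)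
    ((List.perm_ext_iff_of_nodup hn1 hn2).mpr (fun a => (hm1 a).trans (hm2 a).symm))
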